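-- pv_equiv track=rewrite | github.com/konlo/GoStop_antigravity | tests/test_agent/ai_player.py | select_best_card
-- ===== SOURCE A (Python) =====
-- def select_best_card(hand, table_cards):
--     """Simple matching heuristic."""
--     table_months = {c.get('month') for c in table_cards}
--
--     # 1. Look for matches
--     for card in hand:
--         m = card.get('month')
--         if m != 0 and m in table_months:
--             return card
--
--     # 2. If no matches, check for dummy cards
--     for card in hand:
--         if card.get('month') == 0:
--             return card
--
--     # 3. Default to first card
--     return hand[0]
-- ===== SOURCE B (Python) =====
-- def select_best_card(hand, table_cards):
--     """Simple matching heuristic."""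
--     table_months = {c.get('month') for c in table_cards}
--
--     def rank(card):
--         m = card.get('month')
--         if m != 0 and m in table_months:
--             return 0
--         return 1 if m == 0 else 2
--
--     # min is stable: the first card of minimal rank wins, which is exactly
--     # "first match, else first dummy, else hand[0]".
--     return min(hand, key=rank)
-- ===== Notes on version B (the rewrite author's own statement) =====
-- stated objective: alternative
-- what changed: Replaces A's three sequential fallback scans (first match, then first dummy, then hand[0]) by a priority ranking: each card gets rank 0/1/2 and the answer is the single stable min(hand, key=rank).
import Mathlib
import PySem

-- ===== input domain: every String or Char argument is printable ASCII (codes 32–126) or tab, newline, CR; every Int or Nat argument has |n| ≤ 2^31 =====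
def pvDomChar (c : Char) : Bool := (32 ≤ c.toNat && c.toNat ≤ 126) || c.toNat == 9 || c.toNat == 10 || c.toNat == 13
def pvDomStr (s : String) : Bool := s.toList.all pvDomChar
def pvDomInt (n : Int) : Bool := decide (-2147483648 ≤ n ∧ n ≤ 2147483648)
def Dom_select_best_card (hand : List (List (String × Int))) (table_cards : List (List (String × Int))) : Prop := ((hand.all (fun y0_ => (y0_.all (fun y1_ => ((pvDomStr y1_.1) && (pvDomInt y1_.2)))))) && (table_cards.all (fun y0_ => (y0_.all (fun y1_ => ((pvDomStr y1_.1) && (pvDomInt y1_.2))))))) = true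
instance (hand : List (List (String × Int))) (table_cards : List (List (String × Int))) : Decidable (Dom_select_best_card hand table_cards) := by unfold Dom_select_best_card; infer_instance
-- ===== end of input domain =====

-- B replaces A's three sequential fallback scans by one priority ranking (rank 0/1/2) and a
-- single stable min(hand, key=rank); same cost, different decomposition ('alternative').

-- ===== PORT A =====
-- card.get('month') : a card is a Python dict str -> int
def pvGetMonth (card : List (String × Int)) : Option Int :=
  PySem.Dict.get? (PySem.Dict.ofList card) "month"

-- table_months = {c.get('month') for c in table_cards}
def pvTableMonths (table_cards : List (List (String × Int))) : PySem.Set (Option Int) :=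
  PySem.Set.ofList (table_cards.map pvGetMonth)

-- first loop of A: first card with m != 0 and m in table_months
def pvFindMatch (tm : PySem.Set (Option Int)) : List (List (String × Int)) → Option (List (String × Int))
  | [] => none
  | c :: rest =>
      let m := pvGetMonth c
      if m ≠ some 0 ∧ m ∈ tm then some c else pvFindMatch tm rest

-- second loop of A: first card with month == 0
def pvFindDummy : List (List (String × Int)) → Option (List (String × Int))
  | [] => none
  | c :: rest => if pvGetMonth c = some 0 then some c else pvFindDummy rest

def select_best_card (hand : List (List (String × Int))) (table_cards : List (List (String × Int))) : List (String × Int) :=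
  let tm := pvTableMonths table_cards
  match pvFindMatch tm hand with
  | some c => c
  | none =>
    match pvFindDummy hand with
    | some c => c
    | none => (PySem.List.pyGet? hand 0).getD []   -- hand[0]; none (IndexError) excluded by Pre_

-- ===== PORT B =====
-- rank(card): 0 = playable match, 1 = dummy (month == 0), 2 = anything else
def pvRank (tm : PySem.Set (Option Int)) (card : List (String × Int)) : Int :=
  let m := pvGetMonth card
  if m ≠ some 0 ∧ m ∈ tm then 0 else if m = some 0 then 1 else 2

-- min(hand, key=rank): first card of minimal rank
def select_best_card_alt (hand : List (List (String × Int))) (table_cards : List (List (String × Int))) : List (String × Int) :=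
  let tm := pvTableMonths table_cards
  (PySem.List.min? hand (pvRank tm)).getD []   -- none (ValueError on empty hand) excluded by Pre_

-- ===== PRECONDITION & SPEC =====
-- On empty hand A raises IndexError (hand[0]) and B's min raises ValueError.
def Pre_select_best_card (hand : List (List (String × Int))) (table_cards : List (List (String × Int))) : Prop := hand ≠ []
instance (hand : List (List (String × Int))) (table_cards : List (List (String × Int))) : Decidable (Pre_select_best_card hand table_cards) := by unfold Pre_select_best_card; infer_instance

def pvWitness_select_best_card : (List (List (String × Int))) × (List (List (String × Int))) :=
  ([[("month", 3)]], [[("month", 3)]])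

def Spec_select_best_card (hand : List (List (String × Int))) (table_cards : List (List (String × Int))) (out : List (String × Int)) : Prop := out = select_best_card_alt hand table_cards
instance (hand : List (List (String × Int))) (table_cards : List (List (String × Int))) (out : List (String × Int)) : Decidable (Spec_select_best_card hand table_cards out) := by unfold Spec_select_best_card; infer_instance

-- ===== CLAIM (what is proved, stated in full; the proofs are below) =====
def Claim_equal_select_best_card : Prop := ∀ (hand : List (List (String × Int))) (table_cards : List (List (String × Int))), Dom_select_best_card hand table_cards → Pre_select_best_card hand table_cards → Spec_select_best_card hand table_cards (select_best_card hand table_cards)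

-- ===== LEMMAS AND PROOFS =====

-- A's first loop fires exactly on rank-0 cards
theorem pvFindMatch_cons (tm : PySem.Set (Option Int)) (c : List (String × Int)) (rest : List (List (String × Int))) :
    pvFindMatch tm (c :: rest) = if pvRank tm c = 0 then some c else pvFindMatch tm rest := by
  simp only [pvFindMatch, pvRank]
  split_ifs with h h1 h2 <;> simp_all

-- A's second loop fires exactly on rank-1 cards
theorem pvFindDummy_cons (tm : PySem.Set (Option Int)) (c : List (String × Int)) (rest : List (List (String × Int))) :
    pvFindDummy (c :: rest) = if pvRank tm c = 1 then some c else pvFindDummy rest := by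
  simp only [pvFindDummy, pvRank]
  split_ifs with h h1 h2 <;> simp_all

theorem pvRank_cases (tm : PySem.Set (Option Int)) (c : List (String × Int)) :
    pvRank tm c = 0 ∨ pvRank tm c = 1 ∨ pvRank tm c = 2 := by
  simp only [pvRank]; split_ifs <;> simp

-- min(xs, key) on a nonempty list is a plain running-minimum fold (ties keep the earlier element)
theorem pvMin?_key_cons {α κ : Type} [LinearOrder κ] (key : α → κ) (c : α) (rest : List α) :
    PySem.List.min? (c :: rest) key
      = some (rest.foldl (fun m y => if key y < key m then y else m) c) := by
  induction rest generalizing c with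
  | nil => rfl
  | cons y rest ih =>
      have step : PySem.List.min? (c :: y :: rest) key
          = PySem.List.min? ((if key y < key c then y else c) :: rest) key := by
        simp only [PySem.List.min?, List.foldl_cons]
        congr 1
        split <;> rfl
      rw [step, ih]
      simp only [List.foldl_cons]

-- invariant of B's running-minimum fold, phrased through A's two scans
theorem pvFold_min_eq (tm : PySem.Set (Option Int)) (rest : List (List (String × Int)))
    (acc : List (String × Int)) :
    rest.foldl (fun m y => if pvRank tm y < pvRank tm m then y else m) acc
      = (if pvRank tm acc = 0 then acc else
          match pvFindMatch tm rest with
          | some m => m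
          | none =>
            if pvRank tm acc = 1 then acc else
              match pvFindDummy rest with
              | some d => d
              | none => acc) := by
  induction rest generalizing acc with
  | nil => simp [pvFindMatch, pvFindDummy]
  | cons y rest ih =>
      rcases pvRank_cases tm acc with ha | ha | ha <;>
        rcases pvRank_cases tm y with hy | hy | hy <;>
          simp [List.foldl_cons, ha, hy, ih, pvFindMatch_cons tm, pvFindDummy_cons tm]

-- ===== VERDICT (by name: the statement is the Claim_ definition above) =====
theorem select_best_card_spec : Claim_equal_select_best_card := by
  intro hand table_cards _ hne
  unfold Spec_select_best_card select_best_card select_best_card_alt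
  cases hand with
  | nil => exact absurd rfl hne
  | cons c rest =>
      dsimp only
      rw [pvMin?_key_cons (pvRank (pvTableMonths table_cards)) c rest, Option.getD_some,
        pvFold_min_eq (pvTableMonths table_cards) rest c]
      rcases pvRank_cases (pvTableMonths table_cards) c with hc | hc | hc <;>
        simp [hc, pvFindMatch_cons, pvFindDummy_cons (pvTableMonths table_cards)]
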